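-- pv_equiv track=rewrite | github.com/incheol77/kata-problemsolving | codility/Lessons/Lesson01-BinaryGap/Lesson01-BinaryGap-problem.py | countBinaryGap
-- ===== SOURCE A (Python) =====
-- def countBinaryGap(binary):
--     maxGap, cntGap = 0, 0
--     for i in range(1, len(binary)):
--         if binary[i] == 0:
--             cntGap += 1
--         elif binary[i] == 1:
--             if cntGap > maxGap:
--                 maxGap = cntGap
--             cntGap = 0
--     return maxGap
-- ===== SOURCE B (Python) =====
-- def countBinaryGap(binary):
--     # Two-phase split-then-measure: repeatedly cut the tail at the next 1,
--     # collecting the segments between successive boundaries (the virtual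
--     # boundary at index 0 and each later 1); the piece after the last 1 is
--     # discarded, then the best zero-count of a segment is taken.
--     tail = binary[1:]
--     segments = []
--     while 1 in tail:
--         k = tail.index(1)
--         segments.append(tail[:k])
--         tail = tail[k + 1:]
--     best = 0
--     for seg in segments:
--         z = seg.count(0)
--         if z > best:
--             best = z
--     return best
-- ===== Notes on version B (the rewrite author's own statement) =====
-- stated objective: alternative
-- what changed: Replaces A's single forward scan with a running zero-counter by a two-phase split-then-measure algorithm: a while loop repeatedly cuts the tail at the next 1 via membership test, index and slicing to collect the inter-boundary segments, then a second pass takes the best per-segment zero count.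
import Mathlib
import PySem

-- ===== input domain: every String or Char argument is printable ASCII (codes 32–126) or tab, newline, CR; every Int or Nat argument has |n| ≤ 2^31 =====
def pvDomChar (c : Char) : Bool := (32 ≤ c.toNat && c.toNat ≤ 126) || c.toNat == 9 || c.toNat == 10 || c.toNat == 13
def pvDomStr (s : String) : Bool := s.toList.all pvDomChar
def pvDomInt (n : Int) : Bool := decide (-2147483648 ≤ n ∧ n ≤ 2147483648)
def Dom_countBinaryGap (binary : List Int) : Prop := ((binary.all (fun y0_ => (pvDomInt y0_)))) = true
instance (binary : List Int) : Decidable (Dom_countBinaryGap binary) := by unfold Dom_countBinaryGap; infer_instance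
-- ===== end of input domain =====

-- B replaces A's single counting scan by a two-phase split-then-measure algorithm
-- (cut the tail at each 1 via index/slices, then take the best per-segment zero count); same cost.

-- ===== PORT A =====
-- forward loop over range(1, len(binary)) with state (maxGap, cntGap); every index is in range, so binary[i] is pyGetD
def countBinaryGap (binary : List Int) : Int :=
  let st := (PySem.List.pyRange 1 (binary.length : Int) 1).foldl
    (fun (s : Int × Int) i =>
      let x := PySem.List.pyGetD binary i 0
      if x = 0 then (s.1, s.2 + 1)
      else if x = 1 then (if s.2 > s.1 then (s.2, 0) else (s.1, 0))
      else s) ((0 : Int), (0 : Int))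
  st.1

-- ===== PORT B =====
-- the while loop of Source B: while 1 in tail: k = tail.index(1); segments.append(tail[:k]); tail = tail[k+1:]
-- (the `none` branch of the match is unreachable: index? is some whenever 1 ∈ tail)
def pvSplitLoop (tail : List Int) (segments : List (List Int)) : List (List Int) :=
  if (1 : Int) ∈ tail then
    match hk : PySem.List.index? tail 1 with
    | some k =>
        pvSplitLoop (PySem.List.slice tail (some ((k : Int) + 1)) none)
          (segments ++ [PySem.List.slice tail none (some (k : Int))])
    | none => segments
  else segments
termination_by tail.length
decreasing_by
  obtain ⟨hklt, -, -⟩ := PySem.List.getElem_of_index?_eq_some hk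
  have h : PySem.List.slice tail (some ((k : Int) + 1)) none = tail.drop (k + 1) := by
    have := PySem.List.slice_from_natCast tail (k + 1)
    push_cast at this
    exact this
  simp [h]
  omega

def countBinaryGap_alt (binary : List Int) : Int :=
  let tail := PySem.List.slice binary (some 1) none
  let segments := pvSplitLoop tail []
  segments.foldl
    (fun (best : Int) seg =>
      let z : Int := (PySem.List.count seg 0 : Int)
      if z > best then z else best) 0

-- ===== PRECONDITION & SPEC =====
def Spec_countBinaryGap (binary : List Int) (out : Int) : Prop := out = countBinaryGap_alt binary
instance (binary : List Int) (out : Int) : Decidable (Spec_countBinaryGap binary out) := by unfold Spec_countBinaryGap; infer_instance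

-- ===== CLAIM (what is proved, stated in full; the proofs are below) =====
def Claim_equal_countBinaryGap : Prop := ∀ (binary : List Int), Dom_countBinaryGap binary → Spec_countBinaryGap binary (countBinaryGap binary)

-- ===== LEMMAS AND PROOFS =====

-- A's loop body on the element value
def pvStepA (s : Int × Int) (x : Int) : Int × Int :=
  if x = 0 then (s.1, s.2 + 1)
  else if x = 1 then (if s.2 > s.1 then (s.2, 0) else (s.1, 0))
  else s

-- B's measuring loop body
def pvStepB (best : Int) (seg : List Int) : Int :=
  let z : Int := (PySem.List.count seg 0 : Int)
  if z > best then z else best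

lemma pvStepB_eq_max (best : Int) (seg : List Int) :
    pvStepB best seg = max best ((PySem.List.count seg 0 : Int)) := by
  simp only [pvStepB]
  split_ifs <;> omega

-- a segment without a 1 only accumulates its zero count
lemma pvFoldA_no_one (s : List Int) : ∀ (m c : Int), (1 : Int) ∉ s →
    s.foldl pvStepA (m, c) = (m, c + (PySem.List.count s 0 : Int)) := by
  induction s with
  | nil => intro m c _; simp [PySem.List.count]
  | cons x s ih =>
    intro m c hns
    have hx1 : x ≠ 1 := by intro h; exact hns (h ▸ List.mem_cons_self)
    have hns' : (1 : Int) ∉ s := fun h => hns (List.mem_cons_of_mem _ h)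
    by_cases hx0 : x = 0
    · subst hx0
      rw [List.foldl_cons, show pvStepA (m, c) 0 = (m, c + 1) from rfl, ih _ _ hns']
      simp [PySem.List.count_eq]
      omega
    · rw [List.foldl_cons, show pvStepA (m, c) x = (m, c) from by unfold pvStepA; simp [hx0, hx1],
        ih _ _ hns']
      simp [PySem.List.count_eq, hx0]

lemma pvStepA_one (m c : Int) : pvStepA (m, c) 1 = (max m c, 0) := by
  unfold pvStepA
  split_ifs <;> simp_all
  omega

-- one unfold step of the split loop, phrased on the decomposition t = s ++ 1 :: r
lemma pvSplitLoop_step (t s r : List Int) (acc : List (List Int))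
    (htsr : t = s ++ 1 :: r) (hns : (1 : Int) ∉ s) :
    pvSplitLoop t acc = pvSplitLoop r (acc ++ [s]) := by
  have h1 : (1 : Int) ∈ t := by rw [htsr]; simp
  have hk : PySem.List.index? t 1 = some s.length :=
    (PySem.List.index?_eq_some_iff t 1 s.length).mpr ⟨s, r, htsr, rfl, hns⟩
  have htake : PySem.List.slice t none (some (s.length : Int)) = s := by
    rw [PySem.List.slice_to_natCast, htsr, List.take_left]
  have hdrop : PySem.List.slice t (some ((s.length : Int) + 1)) none = r := by
    have h := PySem.List.slice_from_natCast t (s.length + 1)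
    push_cast at h
    rw [h, htsr, ← List.drop_drop, List.drop_left]
    rfl
  rw [pvSplitLoop, if_pos h1]
  split
  · rename_i k' hk'
    rw [hk'] at hk
    obtain rfl : k' = s.length := Option.some.inj hk
    rw [htake, hdrop]
  · rename_i hk'
    rw [hk'] at hk
    exact absurd hk (by simp)

-- the split loop pushes its accumulator out front
lemma pvSplitLoop_acc : ∀ (n : Nat) (t : List Int), t.length ≤ n →
    ∀ (acc : List (List Int)), pvSplitLoop t acc = acc ++ pvSplitLoop t [] := by
  intro n
  induction n with
  | zero =>
    intro t ht acc
    have : t = [] := List.eq_nil_of_length_eq_zero (Nat.le_zero.mp ht)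
    subst this
    rw [pvSplitLoop, pvSplitLoop]
    simp
  | succ n ih =>
    intro t ht acc
    by_cases h1 : (1 : Int) ∈ t
    · obtain ⟨k, hk⟩ := Option.isSome_iff_exists.mp ((PySem.List.index?_isSome_iff t 1).mpr h1)
      obtain ⟨s, r, htsr, hlen, hns⟩ := (PySem.List.index?_eq_some_iff t 1 k).mp hk
      have hrlen : r.length ≤ n := by
        have := congrArg List.length htsr
        simp at this
        omega
      rw [pvSplitLoop_step t s r acc htsr hns, pvSplitLoop_step t s r [] htsr hns,
        ih r hrlen (acc ++ [s]), ih r hrlen ([] ++ [s])]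
      simp
    · rw [pvSplitLoop, pvSplitLoop, if_neg h1, if_neg h1]
      simp

-- main invariant: A's fold from (m, 0) computes B's measuring fold over the split segments
lemma pv_main : ∀ (n : Nat) (t : List Int), t.length ≤ n → ∀ (m : Int),
    (t.foldl pvStepA (m, 0)).1 = (pvSplitLoop t []).foldl pvStepB m := by
  intro n
  induction n with
  | zero =>
    intro t ht m
    have : t = [] := List.eq_nil_of_length_eq_zero (Nat.le_zero.mp ht)
    subst this
    rw [pvSplitLoop]
    simp
  | succ n ih =>
    intro t ht m
    by_cases h1 : (1 : Int) ∈ t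
    · obtain ⟨k, hk⟩ := Option.isSome_iff_exists.mp ((PySem.List.index?_isSome_iff t 1).mpr h1)
      obtain ⟨s, r, htsr, hlen, hns⟩ := (PySem.List.index?_eq_some_iff t 1 k).mp hk
      have hrlen : r.length ≤ n := by
        have := congrArg List.length htsr
        simp at this
        omega
      rw [pvSplitLoop_step t s r [] htsr hns]
      simp only [List.nil_append]
      rw [pvSplitLoop_acc r.length r le_rfl [s], htsr, List.foldl_append, pvFoldA_no_one s m 0 hns, List.foldl_cons]
      simp only [zero_add]
      rw [pvStepA_one, ih r hrlen, List.cons_append, List.nil_append, List.foldl_cons,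
        pvStepB_eq_max]
    · rw [pvSplitLoop, if_neg h1, List.foldl_nil]
      have := pvFoldA_no_one t m 0 h1
      rw [this]

-- ===== VERDICT (by name: the statement is the Claim_ definition above) =====
theorem countBinaryGap_spec : Claim_equal_countBinaryGap := by
  unfold Claim_equal_countBinaryGap Spec_countBinaryGap
  intro binary _
  have hA : countBinaryGap binary = (binary.tail.foldl pvStepA ((0 : Int), (0 : Int))).1 := by
    unfold countBinaryGap
    have := PySem.List.foldl_pyRange_pyGetD' (xs := binary) (d := 0) (f := pvStepA)
      (init := ((0 : Int), (0 : Int))) (a := 1) (by norm_num)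
    simp only at this ⊢
    rw [show ((1 : Int).toNat = 1) from rfl, List.drop_one] at this
    simp only [pvStepA] at this
    exact congrArg Prod.fst this
  have hB : countBinaryGap_alt binary = (pvSplitLoop binary.tail []).foldl pvStepB 0 := by
    unfold countBinaryGap_alt pvStepB
    rw [PySem.List.slice_from_one]
  rw [hA, hB, pv_main binary.tail.length binary.tail le_rfl 0]
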